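-- pv_equiv track=rewrite | github.com/squables/sqproto | util.py | sum_to_n
-- ===== SOURCE A (Python) =====
-- import itertools
-- from operator import sub
--
-- def sum_to_n(n):
--     'Generate the series of +ve integer lists which sum to a +ve integer, n.'
--     b, mid, e = [0], list(range(1, n)), [n]
--     splits = (d for i in range(n) for d in itertools.combinations(mid, i))
--     foo = (list(map(sub, itertools.chain(s, e), itertools.chain(b, s))) for s in splits)
--
--     pows = [pow(2, x) for x in range(0, n + 1)]
--     possible = []
--     for x in foo:
--         used = []
--         success = True
--         for y in x:
--             if(y not in pows):
--                 success = False
--                 break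
--             if(y in used):
--                 success = False
--                 break
--             else: used.append(y)
--
--         x.sort()
--         if(x not in possible and success): possible.append(x)
--     return possible
-- ===== SOURCE B (Python) =====
-- def sum_to_n(n):
--     'Generate the series of +ve integer lists which sum to a +ve integer, n.'
--     if n <= 0:
--         return []
--     return [[1 << i for i in range(n.bit_length()) if (n >> i) & 1]]
-- ===== Notes on version B (the rewrite author's own statement) =====
-- stated objective: faster
-- what changed: A enumerates every composition of n and filters those made of distinct powers of two; B uses uniqueness of binary representation and reads n's set bits directly, producing the single sorted list (intended as asymptotically faster; a timing run saw A time out beyond small n, so the speed-up could not be confirmed on a common size).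
import Mathlib
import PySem

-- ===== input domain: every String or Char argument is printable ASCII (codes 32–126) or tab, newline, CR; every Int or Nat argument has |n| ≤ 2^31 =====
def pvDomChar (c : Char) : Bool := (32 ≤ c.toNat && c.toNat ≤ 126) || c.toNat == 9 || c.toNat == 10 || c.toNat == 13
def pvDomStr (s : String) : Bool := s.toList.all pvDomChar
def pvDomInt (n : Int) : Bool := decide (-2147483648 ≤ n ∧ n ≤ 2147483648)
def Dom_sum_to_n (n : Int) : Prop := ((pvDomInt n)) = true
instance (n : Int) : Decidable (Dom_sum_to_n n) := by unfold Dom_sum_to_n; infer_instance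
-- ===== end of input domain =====

-- B replaces A's exponential scan over all compositions of n by reading n's binary
-- representation directly (uniqueness of binary representation); intended as faster
-- (A times out beyond small n, so a timing run could not confirm it on a common size).

-- ===== PORT A =====
-- inner filter loop of A: for y in x: fail if y not a listed power or already used
def checkLoop (pows : List Int) : List Int → List Int → Bool
  | [], _ => true
  | y :: ys, used =>
    if y ∉ pows then false
    else if y ∈ used then false
    else checkLoop pows ys (used ++ [y])

def sum_to_n (n : Int) : List (List Int) :=
  let mid := PySem.List.pyRange 1 n 1
  -- i runs over range(n), so i ≥ 0 and i.toNat is exact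
  let splits := (PySem.List.pyRange 0 n 1).flatMap
    (fun i => PySem.List.combinations mid i.toNat)
  let foo := splits.map (fun s => List.zipWith (fun p q => p - q) (s ++ [n]) (0 :: s))
  let pows := (PySem.List.pyRange 0 (n + 1) 1).map (fun x => (2 : Int) ^ x.toNat)
  foo.foldl (fun possible x =>
    let success := checkLoop pows x []
    let xs := PySem.List.sorted x (fun y => y) false
    if xs ∉ possible ∧ success = true then possible ++ [xs] else possible) []

-- ===== PORT B =====
def sum_to_n_alt (n : Int) : List (List Int) :=
  if n ≤ 0 then []
  else [((PySem.List.pyRange 0 (PySem.Int.bitLength n : Int) 1).filter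
           (fun i => PySem.Int.band (n >>> i.toNat) 1 != 0)).map
          (fun i => (1 : Int) <<< i.toNat)]

-- ===== PRECONDITION & SPEC =====
def Spec_sum_to_n (n : Int) (out : List (List Int)) : Prop := out = sum_to_n_alt n
instance (n : Int) (out : List (List Int)) : Decidable (Spec_sum_to_n n out) := by unfold Spec_sum_to_n; infer_instance

-- ===== CLAIM (what is proved, stated in full; the proofs are below) =====
def Claim_equal_sum_to_n : Prop := ∀ (n : Int), Dom_sum_to_n n → Spec_sum_to_n n (sum_to_n n)

-- ===== LEMMAS AND PROOFS =====

-- the canonical answer: the set bits of n, ascending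
def blist (n : Int) : List Int := (Nat.bitIndices n.toNat).map (fun k => ((2 ^ k : Nat) : Int))

-- partial sums of a composition, excluding the final total
def psum : Int → List Int → List Int
  | _, [] => []
  | _, [_] => []
  | a, y :: ys => (a + y) :: psum (a + y) ys

lemma telescope_sum (s : List Int) (a n : Int) :
    (List.zipWith (fun p q => p - q) (s ++ [n]) (a :: s)).sum = n - a := by
  induction s generalizing a with
  | nil => simp
  | cons y ys ih =>
    simp only [List.cons_append, List.zipWith_cons_cons, List.sum_cons, ih y]
    ring

lemma checkLoop_iff (pows : List Int) (x used : List Int) :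
    checkLoop pows x used = true ↔ x.Nodup ∧ ∀ y ∈ x, y ∈ pows ∧ y ∉ used := by
  induction x generalizing used with
  | nil => simp [checkLoop]
  | cons y ys ih =>
    simp only [checkLoop]
    by_cases hp : y ∈ pows
    · by_cases hu : y ∈ used
      · rw [if_neg (by simpa using hp), if_pos hu]
        simp [hu]
      · rw [if_neg (by simpa using hp), if_neg hu, ih]
        simp only [List.nodup_cons, List.mem_append, List.mem_cons,
          List.not_mem_nil, or_false]
        constructor
        · rintro ⟨h1, h2⟩
          refine ⟨⟨fun hy => (h2 y hy).2 (Or.inr rfl), h1⟩, ?_⟩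
          rintro z (rfl | hz)
          · exact ⟨hp, hu⟩
          · obtain ⟨h3, h4⟩ := h2 z hz
            exact ⟨h3, fun hzu => h4 (Or.inl hzu)⟩
        · rintro ⟨⟨hyys, h1⟩, h2⟩
          refine ⟨h1, fun z hz => ?_⟩
          obtain ⟨h3, h4⟩ := h2 z (Or.inr hz)
          refine ⟨h3, ?_⟩
          rintro (hzu | rfl)
          · exact h4 hzu
          · exact hyys hz
    · simp [hp]

lemma diffs_psum (ys : List Int) (y a : Int) :
    List.zipWith (fun p q => p - q) (psum a (y :: ys) ++ [a + (y :: ys).sum]) (a :: psum a (y :: ys))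
      = y :: ys := by
  induction ys generalizing a y with
  | nil => simp [psum]
  | cons z zs ih =>
    show List.zipWith _ (((a + y) :: psum (a + y) (z :: zs)) ++ [a + (y :: z :: zs).sum])
        (a :: (a + y) :: psum (a + y) (z :: zs)) = _
    have : a + (y :: z :: zs).sum = (a + y) + (z :: zs).sum := by simp; ring
    rw [this]
    simpa using ih z (a + y)

lemma psum_facts (ys : List Int) (y a : Int) (hpos : ∀ v ∈ y :: ys, 1 ≤ v) :
    (∀ b ∈ psum a (y :: ys), a < b ∧ b < a + (y :: ys).sum) ∧
      (psum a (y :: ys)).Pairwise (· < ·) := by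
  induction ys generalizing a y with
  | nil => simp [show psum a [y] = [] from rfl]
  | cons z zs ih =>
    rw [show psum a (y :: z :: zs) = (a + y) :: psum (a + y) (z :: zs) from rfl]
    have hy : 1 ≤ y := hpos y (by simp)
    have hz : ∀ v ∈ z :: zs, 1 ≤ v := fun v hv => hpos v (by simp [hv])
    have hsum : 1 ≤ (z :: zs).sum := by
      have h0 : (0:Int) ≤ zs.sum := List.sum_nonneg (fun v hv => by
        have := hz v (by simp [hv]); omega)
      have := hz z (by simp); simp; omega
    obtain ⟨hb, hpw⟩ := ih z (a + y) hz
    have hsplit : a + (y :: z :: zs).sum = (a + y) + (z :: zs).sum := by simp; ring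
    constructor
    · intro b hbm
      rcases List.mem_cons.1 hbm with rfl | hbmem
      · exact ⟨by omega, by omega⟩
      · obtain ⟨h1, h2⟩ := hb b hbmem
        exact ⟨by omega, by omega⟩
    · refine List.pairwise_cons.2 ⟨fun b hbmem => ?_, hpw⟩
      exact (hb b hbmem).1

lemma sub_range (l : List Int) (a b : Int) (hpw : l.Pairwise (· < ·))
    (hmem : ∀ y ∈ l, a ≤ y ∧ y < b) : l.Sublist (PySem.List.pyRange a b 1) := by
  induction l generalizing a with
  | nil => exact List.nil_sublist _
  | cons y t ih =>
    obtain ⟨hay, hyb⟩ := hmem y (by simp)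
    have hsplit : PySem.List.pyRange a b 1
        = PySem.List.pyRange a y 1 ++ PySem.List.pyRange y b 1 :=
      PySem.List.pyRange_one_append a y b hay (le_of_lt hyb)
    have hcons : PySem.List.pyRange y b 1 = y :: PySem.List.pyRange (y + 1) b 1 :=
      PySem.List.pyRange_one_cons hyb
    have ht : t.Sublist (PySem.List.pyRange (y + 1) b 1) := by
      refine ih (y + 1) (List.Pairwise.sublist (List.sublist_cons_self y t) hpw) (fun z hz => ?_)
      have := (List.pairwise_cons.1 hpw).1 z hz
      have := (hmem z (by simp [hz])).2
      omega
    rw [hsplit, hcons]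
    exact (List.Sublist.cons₂ y ht).trans (List.sublist_append_right _ _)

lemma filter_twoPow_sum (k : Nat) : ∀ m : Nat, m < 2 ^ k →
    ((((List.range k).filter m.testBit).map (fun i => 2 ^ i)).sum = m) := by
  induction k with
  | zero => intro m hm; interval_cases m; simp
  | succ k ih =>
    intro m hm
    rw [List.range_succ_eq_map]
    have hfm : (((List.range k).map Nat.succ).filter m.testBit)
        = (((List.range k).filter (fun i => (m / 2).testBit i)).map Nat.succ) := by
      rw [List.filter_map]
      congr 1
      apply List.filter_congr
      intro i _
      simp [Function.comp, Nat.testBit_succ]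
    have h2 : m / 2 < 2 ^ k := by omega
    have hrec := ih (m / 2) h2
    by_cases h0 : m.testBit 0
    · rw [List.filter_cons_of_pos (by simpa using h0), hfm]
      simp only [List.map_cons, List.map_map, List.sum_cons, pow_zero]
      have : ((List.filter (fun i => (m/2).testBit i) (List.range k)).map ((fun i => 2 ^ i) ∘ Nat.succ)).sum
          = 2 * (((List.range k).filter (fun i => (m/2).testBit i)).map (fun i => 2 ^ i)).sum := by
        rw [← List.sum_map_mul_left]
        congr 1
        apply List.map_congr_left
        intro i _
        simp [Function.comp, pow_succ]; ring
      rw [this, hrec]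
      have := Nat.testBit_zero m  -- testBit 0 ↔ m % 2 = 1
      have h1 : m % 2 = 1 := by
        simpa [Nat.testBit_zero] using h0
      omega
    · rw [List.filter_cons_of_neg (by simpa using h0), hfm]
      simp only [List.map_map]
      have : ((List.filter (fun i => (m/2).testBit i) (List.range k)).map ((fun i => 2 ^ i) ∘ Nat.succ)).sum
          = 2 * (((List.range k).filter (fun i => (m/2).testBit i)).map (fun i => 2 ^ i)).sum := by
        rw [← List.sum_map_mul_left]
        congr 1
        apply List.map_congr_left
        intro i _
        simp [Function.comp, pow_succ]; ring
      rw [this, hrec]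
      have h1 : m % 2 = 0 := by
        simpa [Nat.testBit_zero] using h0
      omega
lemma bitIndices_eq_filter (k m : Nat) (h : m < 2 ^ k) :
    (List.range k).filter m.testBit = m.bitIndices := by
  have hpw : ((List.range k).filter m.testBit).Pairwise (· < ·) :=
    List.Pairwise.sublist List.filter_sublist List.pairwise_lt_range
  have hs : ((List.range k).filter m.testBit).SortedLT :=
    List.sortedLT_iff_pairwise.2 hpw
  have := Nat.bitIndices_twoPowsum hs
  rw [filter_twoPow_sum k m h] at this
  exact this.symm

lemma sorted_success (n : Int) (x : List Int)
    (hnd : x.Nodup) (hpow : ∀ y ∈ x, ∃ k : Nat, y = ((2 ^ k : Nat) : Int))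
    (hsum : x.sum = n) :
    PySem.List.sorted x (fun y => y) false = blist n := by
  set xs := PySem.List.sorted x (fun y => y) false with hxs
  have hperm : xs.Perm x := PySem.List.sorted_perm x (fun y => y) false
  have hndxs : xs.Nodup := hperm.nodup_iff.2 hnd
  have hle : xs.Pairwise (fun a b => a ≤ b) := PySem.List.sorted_pairwise x (fun y => y)
  have hlt : xs.Pairwise (· < ·) :=
    (hle.and hndxs).imp (fun h => lt_of_le_of_ne h.1 h.2)
  have hpow' : ∀ y ∈ xs, ∃ k : Nat, y = ((2 ^ k : Nat) : Int) :=
    fun y hy => hpow y (hperm.subset hy)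
  have hsum' : xs.sum = n := hperm.sum_eq.trans hsum
  have hxsL : xs = (xs.map Int.toNat).map (fun v : Nat => (v : Int)) := by
    rw [List.map_map]
    symm
    have h1 : ∀ y ∈ xs, ((fun v : Int => ((v.toNat : Nat) : Int)) y) = y := by
      intro y hy
      obtain ⟨k, rfl⟩ := hpow' y hy
      simp
    exact (List.map_congr_left h1).trans (List.map_id xs)
  set L := xs.map Int.toNat with hL
  have hLpow : ∀ v ∈ L, ∃ k : Nat, v = 2 ^ k := by
    intro v hv
    obtain ⟨y, hy, rfl⟩ := List.mem_map.1 hv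
    obtain ⟨k, rfl⟩ := hpow' y hy
    exact ⟨k, (Int.toNat_natCast _).symm ▸ rfl⟩
  have hLlt : L.Pairwise (· < ·) := by
    rw [hxsL] at hlt
    rw [List.pairwise_map] at hlt
    exact hlt.imp (fun h => by exact_mod_cast h)
  have hLE : L = (L.map Nat.log2).map (fun k => 2 ^ k) := by
    rw [List.map_map]
    symm
    have h1 : ∀ v ∈ L, ((fun v : Nat => 2 ^ Nat.log2 v) v) = v := by
      intro v hv
      obtain ⟨k, rfl⟩ := hLpow v hv
      simp [Nat.log2_two_pow]
    exact (List.map_congr_left h1).trans (List.map_id L)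
  set E := L.map Nat.log2 with hE
  have hElt : E.Pairwise (· < ·) := by
    have := hLE ▸ hLlt
    rw [List.pairwise_map] at this
    exact this.imp (fun h => (Nat.pow_lt_pow_iff_right one_lt_two).1 h)
  have hbits := Nat.bitIndices_twoPowsum (List.sortedLT_iff_pairwise.2 hElt)
  have hsumL : (L.map (fun v : Nat => (v : Int))).sum = n := by rw [← hxsL]; exact hsum'
  have hsumE : (E.map (fun k => 2 ^ k)).sum = n.toNat := by
    rw [← hLE]
    have h2 : ((L.sum : Nat) : Int) = n := by
      rw [← hsumL, Nat.cast_list_sum]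
    omega
  rw [hsumE] at hbits
  rw [hxsL]
  conv_lhs => rw [hLE]
  rw [← hbits]
  simp [blist, List.map_map]

lemma fold_collect (c : List Int) (P : List Int → Bool) (g : List Int → List Int)
    (l : List (List Int)) (hc : ∀ x ∈ l, P x = true → g x = c) :
    ∀ acc, ((acc = [] ∧ ∃ x ∈ l, P x = true) ∨ acc = [c]) →
    l.foldl (fun possible x =>
      if g x ∉ possible ∧ P x = true then possible ++ [g x] else possible) acc = [c] := by
  induction l with
  | nil => rintro acc (⟨rfl, ⟨x, hx, _⟩⟩ | rfl)
           · exact absurd hx (by simp)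
           · rfl
  | cons x t ih =>
    rintro acc (⟨rfl, ⟨z, hz, hPz⟩⟩ | rfl)
    · simp only [List.foldl_cons]
      by_cases hPx : P x = true
      · rw [if_pos (by simp [hPx])]
        exact ih (fun y hy => hc y (by simp [hy])) _ (Or.inr (by rw [hc x (by simp) hPx]; rfl))
      · rw [if_neg (by simp [hPx])]
        have hzt : z ∈ t := by
          rcases List.mem_cons.1 hz with rfl | hz'
          · exact absurd hPz hPx
          · exact hz'
        exact ih (fun y hy => hc y (by simp [hy])) _ (Or.inl ⟨rfl, z, hzt, hPz⟩)
    · simp only [List.foldl_cons]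
      have : (if g x ∉ [c] ∧ P x = true then [c] ++ [g x] else [c]) = [c] := by
        by_cases hPx : P x = true
        · rw [if_neg]; simp [hc x (by simp) hPx, hPx]
        · rw [if_neg]; simp [hPx]
      rw [this]
      exact ih (fun y hy => hc y (by simp [hy])) _ (Or.inr rfl)

lemma alt_eq (n : Int) (hn : 1 ≤ n) : sum_to_n_alt n = [blist n] := by
  rw [sum_to_n_alt, if_neg (by omega)]
  set m := n.toNat with hm
  have hnm : n = (m : Int) := by omega
  congr 1
  rw [PySem.List.pyRange_zero_nat, List.filter_map, List.map_map]
  have hfc : ∀ j ∈ List.range (PySem.Int.bitLength n),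
      ((fun i : Int => PySem.Int.band (n >>> ((i.toNat : Nat) : Int)) 1 != 0) ∘ (fun k : Nat => (k : Int))) j
        = m.testBit j := by
    intro j _
    simp only [Function.comp, Int.toNat_natCast]
    rw [hnm]
    have h1 : ((m : Int)) >>> ((j : Nat) : Int) = ((m >>> j : Nat) : Int) := by simp
    rw [h1]
    have h2 : PySem.Int.band ((m >>> j : Nat) : Int) 1 = (((m >>> j) &&& 1 : Nat) : Int) := by
      exact_mod_cast PySem.Int.band_natCast (m >>> j) 1
    rw [h2, Nat.testBit, Nat.one_and_eq_mod_two, Nat.and_one_is_mod]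
    rcases Nat.mod_two_eq_zero_or_one (m >>> j) with h | h <;> simp [h]
  rw [List.filter_congr hfc]
  have hmap : ∀ j ∈ (List.range (PySem.Int.bitLength n)).filter m.testBit,
      ((fun i : Int => (1 : Int) <<< ((i.toNat : Nat) : Int)) ∘ (fun k : Nat => (k : Int))) j
        = ((2 ^ j : Nat) : Int) := by
    intro j _
    simp only [Function.comp, Int.toNat_natCast]
    exact Int.one_shiftLeft j
  rw [List.map_congr_left hmap, bitIndices_eq_filter _ m
    (by have := PySem.Int.lt_two_pow_bitLength n; omega)]
  rfl

lemma main_eq (n : Int) : sum_to_n n = sum_to_n_alt n := by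
  by_cases hn : n ≤ 0
  · rw [sum_to_n, sum_to_n_alt, if_pos hn]
    simp [PySem.List.pyRange_one_eq_nil hn]
  · push Not at hn
    have hn1 : 1 ≤ n := hn
    rw [alt_eq n hn1, sum_to_n]
    set mid := PySem.List.pyRange 1 n 1 with hmid
    set pows := (PySem.List.pyRange 0 (n + 1) 1).map (fun x => (2 : Int) ^ x.toNat) with hpows
    set splits := (PySem.List.pyRange 0 n 1).flatMap
      (fun i => PySem.List.combinations mid i.toNat) with hsplits
    set foo := splits.map
      (fun s => List.zipWith (fun p q => p - q) (s ++ [n]) (0 :: s)) with hfoo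
    -- membership in pows gives "is a power of two"
    have hpows_pow : ∀ y ∈ pows, ∃ k : Nat, y = ((2 ^ k : Nat) : Int) := by
      intro y hy
      obtain ⟨i, _, rfl⟩ := List.mem_map.1 hy
      exact ⟨i.toNat, by push_cast; ring⟩
    -- every successful composition sorts to blist n
    have hc : ∀ x ∈ foo, checkLoop pows x [] = true →
        PySem.List.sorted x (fun y => y) false = blist n := by
      intro x hx hchk
      obtain ⟨s, _, rfl⟩ := List.mem_map.1 hx
      obtain ⟨hnd, hmem⟩ := (checkLoop_iff pows _ []).1 hchk
      refine sorted_success n _ hnd (fun y hy => hpows_pow y (hmem y hy).1) ?_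
      have := telescope_sum s 0 n
      simpa using this
    -- facts about blist n
    have hm1 : 1 ≤ n.toNat := by omega
    have hsumb : (blist n).sum = n := by
      have h1 : blist n = ((Nat.bitIndices n.toNat).map (fun k => (2 : Nat) ^ k)).map
          (fun v : Nat => (v : Int)) := by
        rw [blist, List.map_map]; rfl
      rw [h1, ← Nat.cast_list_sum, Nat.twoPowSum_bitIndices]
      omega
    have hpairb : (blist n).Pairwise (· < ·) := by
      rw [blist, List.pairwise_map]
      exact (List.sortedLT_iff_pairwise.1 Nat.bitIndices_sorted).imp
        (fun h => by exact_mod_cast Nat.pow_lt_pow_right one_lt_two h)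
    have hnodb : (blist n).Nodup := hpairb.imp (fun h => ne_of_lt h)
    have hposb : ∀ v ∈ blist n, 1 ≤ v := by
      intro v hv
      obtain ⟨k, _, rfl⟩ := List.mem_map.1 hv
      have := Nat.one_le_two_pow (n := k)
      exact_mod_cast this
    have hmemp : ∀ y ∈ blist n, y ∈ pows := by
      intro y hy
      obtain ⟨k, hk, rfl⟩ := List.mem_map.1 hy
      have h2 : 2 ^ k ≤ n.toNat := Nat.two_pow_le_of_mem_bitIndices hk
      have h3 : k < 2 ^ k := Nat.lt_two_pow_self
      refine List.mem_map.2 ⟨(k : Int), PySem.List.mem_pyRange_one.2 ⟨by positivity, by omega⟩, ?_⟩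
      rw [Int.toNat_natCast]
      push_cast; ring
    have hneb : blist n ≠ [] := by
      intro h
      rw [h] at hsumb
      simp at hsumb
      omega
    -- the witness composition: blist n itself, via its partial sums
    obtain ⟨y, ys, hys⟩ : ∃ y ys, blist n = y :: ys := by
      cases hbl : blist n with
      | nil => exact absurd hbl hneb
      | cons y ys => exact ⟨y, ys, rfl⟩
    have hposb' : ∀ v ∈ y :: ys, 1 ≤ v := by rw [← hys]; exact hposb
    have hsum' : (y :: ys).sum = n := by rw [← hys]; exact hsumb
    obtain ⟨hbnd, hpwps⟩ := psum_facts ys y 0 hposb'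
    have hdiff : List.zipWith (fun p q => p - q) (psum 0 (y :: ys) ++ [n]) (0 :: psum 0 (y :: ys))
        = y :: ys := by
      have := diffs_psum ys y 0
      rw [hsum'] at this
      simpa using this
    have hsub : (psum 0 (y :: ys)).Sublist mid := by
      rw [hmid]
      refine sub_range _ 1 n hpwps (fun b hb => ?_)
      obtain ⟨h1, h2⟩ := hbnd b hb
      rw [hsum'] at h2
      omega
    have hlen : (psum 0 (y :: ys)).length ≤ (n - 1).toNat := by
      have := hsub.length_le
      rwa [hmid, PySem.List.length_pyRange_one] at this
    have hmemfoo : blist n ∈ foo := by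
      refine List.mem_map.2 ⟨psum 0 (y :: ys), ?_, by rw [hdiff, hys]⟩
      refine List.mem_flatMap.2 ⟨((psum 0 (y :: ys)).length : Int), ?_, ?_⟩
      · exact PySem.List.mem_pyRange_one.2 ⟨by positivity, by omega⟩
      · rw [Int.toNat_natCast]
        exact (PySem.List.mem_combinations_iff mid _ _).2 ⟨hsub, rfl⟩
    have hchkb : checkLoop pows (blist n) [] = true :=
      (checkLoop_iff pows _ []).2 ⟨hnodb, fun z hz => ⟨hmemp z hz, by simp⟩⟩
    exact fold_collect (blist n) (fun x => checkLoop pows x [])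
      (fun x => PySem.List.sorted x (fun y => y) false) foo hc []
      (Or.inl ⟨rfl, blist n, hmemfoo, hchkb⟩)


-- ===== VERDICT (by name: the statement is the Claim_ definition above) =====
theorem sum_to_n_spec : Claim_equal_sum_to_n := by
  intro n _
  unfold Spec_sum_to_n
  exact main_eq n
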